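-- pv_equiv track=rewrite | github.com/StevenXoFk/Tarea-taller-Tkinter | convertidor.py | base6_a_base2
-- ===== SOURCE A (Python) =====
-- def base6_a_base2(numero):
--     decimal = 0
--     exponente = 0
--
--     while numero > 0:
--         digitos = numero % 10
--         decimal += digitos * (6 ** exponente)
--         numero //= 10
--         exponente += 1
--
--     binario = 0
--     valor = 1
--     while decimal > 0:
--         todo = decimal % 2
--         binario += todo * valor
--         decimal //= 2
--         valor *= 10
--
--     return binario
-- ===== SOURCE B (Python) =====
-- def base6_a_base2(numero):
--     # phase 1: collect decimal digits LSB-first, then Horner-fold in base 6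
--     digs = []
--     n = numero
--     while n > 0:
--         digs.append(n % 10)
--         n //= 10
--     decimal = 0
--     for d in reversed(digs):
--         decimal = decimal * 6 + d
--     # phase 2: collect bits LSB-first, then Horner-fold in base 10
--     bits = []
--     while decimal > 0:
--         bits.append(decimal % 2)
--         decimal //= 2
--     binario = 0
--     for b in reversed(bits):
--         binario = binario * 10 + b
--     return binario
-- ===== Notes on version B (the rewrite author's own statement) =====
-- stated objective: alternative
-- what changed: Both while-loops with running power/place-value accumulators (6**exponente, valor*=10) are replaced by collect-the-digits lists followed by Horner folds over the reversed lists, so no power or place-value variable is maintained.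
import Mathlib
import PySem

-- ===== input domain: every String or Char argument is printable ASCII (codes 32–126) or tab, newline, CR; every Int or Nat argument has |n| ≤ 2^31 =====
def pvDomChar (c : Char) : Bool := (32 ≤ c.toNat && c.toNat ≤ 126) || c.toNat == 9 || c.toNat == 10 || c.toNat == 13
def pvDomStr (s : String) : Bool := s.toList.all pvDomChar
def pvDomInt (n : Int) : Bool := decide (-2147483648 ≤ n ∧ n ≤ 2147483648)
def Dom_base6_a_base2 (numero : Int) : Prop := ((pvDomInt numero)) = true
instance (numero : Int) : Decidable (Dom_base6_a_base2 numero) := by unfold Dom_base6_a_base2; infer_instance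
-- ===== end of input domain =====

-- B restructures both loops as collect-digits-then-Horner-fold (no power/place-value accumulators); same value on every Int.

-- termination helper used by the ports' recursions
theorem pv_floordiv10_toNat_lt (n : Int) (hn : 0 < n) :
    (PySem.Int.floordiv n 10).toNat < n.toNat := by
  rw [PySem.Int.floordiv_eq_ediv_of_pos (by norm_num)]
  omega

theorem pv_floordiv2_toNat_lt (n : Int) (hn : 0 < n) :
    (PySem.Int.floordiv n 2).toNat < n.toNat := by
  rw [PySem.Int.floordiv_eq_ediv_of_pos (by norm_num)]
  omega

-- ===== PORT A =====
-- first while-loop of A: decimal += (numero % 10) * 6 ** exponente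
def pvLoop1A (numero decimal exponente : Int) : Int :=
  if h : numero > 0 then
    pvLoop1A (PySem.Int.floordiv numero 10)
      (decimal + (PySem.Int.mod numero 10) * 6 ^ exponente.toNat) (exponente + 1)
  else decimal
termination_by numero.toNat
decreasing_by exact pv_floordiv10_toNat_lt numero h

-- second while-loop of A: binario += (decimal % 2) * valor; valor *= 10
def pvLoop2A (decimal binario valor : Int) : Int :=
  if h : decimal > 0 then
    pvLoop2A (PySem.Int.floordiv decimal 2)
      (binario + (PySem.Int.mod decimal 2) * valor) (valor * 10)
  else binario
termination_by decimal.toNat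
decreasing_by exact pv_floordiv2_toNat_lt decimal h

def base6_a_base2 (numero : Int) : Int :=
  pvLoop2A (pvLoop1A numero 0 0) 0 1

-- ===== PORT B =====
-- peel the decimal digits / bits of n, LSB-first (Python's append loops)
def pvDigits10 (n : Int) : List Int :=
  if h : n > 0 then PySem.Int.mod n 10 :: pvDigits10 (PySem.Int.floordiv n 10) else []
termination_by n.toNat
decreasing_by exact pv_floordiv10_toNat_lt n h

def pvDigits2 (n : Int) : List Int :=
  if h : n > 0 then PySem.Int.mod n 2 :: pvDigits2 (PySem.Int.floordiv n 2) else []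
termination_by n.toNat
decreasing_by exact pv_floordiv2_toNat_lt n h

def base6_a_base2_alt (numero : Int) : Int :=
  let decimal := (pvDigits10 numero).reverse.foldl (fun a d => a * 6 + d) 0
  (pvDigits2 decimal).reverse.foldl (fun a b => a * 10 + b) 0

-- ===== PRECONDITION & SPEC =====
def Spec_base6_a_base2 (numero : Int) (out : Int) : Prop := out = base6_a_base2_alt numero
instance (numero : Int) (out : Int) : Decidable (Spec_base6_a_base2 numero out) := by unfold Spec_base6_a_base2; infer_instance

-- ===== CLAIM (what is proved, stated in full; the proofs are below) =====
def Claim_equal_base6_a_base2 : Prop := ∀ (numero : Int), Dom_base6_a_base2 numero → Spec_base6_a_base2 numero (base6_a_base2 numero)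

-- ===== LEMMAS AND PROOFS =====
-- LSB-first positional value of a digit list in base `b`
def pvVal (b : Int) : List Int → Int
  | [] => 0
  | d :: t => d + b * pvVal b t

theorem pv_revFold (b : Int) (l : List Int) : ∀ acc : Int,
    l.reverse.foldl (fun a d => a * b + d) acc = acc * b ^ l.length + pvVal b l := by
  induction l with
  | nil => intro acc; simp [pvVal]
  | cons d t ih =>
    intro acc
    simp only [List.reverse_cons, List.foldl_append, List.foldl_cons, List.foldl_nil, ih,
      pvVal, List.length_cons, pow_succ]
    ring

theorem pv_loop1 : ∀ (n dec exp : Int), 0 ≤ exp →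
    pvLoop1A n dec exp = dec + 6 ^ exp.toNat * pvVal 6 (pvDigits10 n) := by
  intro n dec exp
  induction n, dec, exp using pvLoop1A.induct with
  | case1 n dec exp h ih =>
    intro hexp
    rw [pvLoop1A, pvDigits10]
    simp only [h, dif_pos]
    rw [ih (by omega), pvVal]
    have : (exp + 1).toNat = exp.toNat + 1 := by omega
    rw [this, pow_succ]
    ring
  | case2 n dec exp h =>
    intro _
    rw [pvLoop1A, pvDigits10]
    simp [h, pvVal]

theorem pv_loop2 : ∀ (dec bin val : Int),
    pvLoop2A dec bin val = bin + val * pvVal 10 (pvDigits2 dec) := by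
  intro dec bin val
  induction dec, bin, val using pvLoop2A.induct with
  | case1 dec bin val h ih =>
    rw [pvLoop2A, pvDigits2]
    simp only [h, dif_pos]
    rw [ih, pvVal]
    ring
  | case2 dec bin val h =>
    rw [pvLoop2A, pvDigits2]
    simp [h, pvVal]

-- ===== VERDICT (by name: the statement is the Claim_ definition above) =====
theorem base6_a_base2_spec : Claim_equal_base6_a_base2 := by
  unfold Claim_equal_base6_a_base2
  intro numero _
  unfold Spec_base6_a_base2 base6_a_base2 base6_a_base2_alt
  rw [pv_loop1 numero 0 0 le_rfl, pv_loop2, pv_revFold, pv_revFold]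
  norm_num
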